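-- pv_equiv track=rewrite | github.com/CodingThrust/problem-reductions | docs/paper/verify-reductions/verify_subsetsum_partition.py | find_partition_solution
-- ===== SOURCE A (Python) =====
-- def find_partition_solution(sizes):
--     """Return a config (0/1 list) for a balanced partition, or None."""
--     total = sum(sizes)
--     if total % 2 != 0:
--         return None
--     half = total // 2
--     n = len(sizes)
--     for bits in range(2**n):
--         s = sum(sizes[i] for i in range(n) if (bits >> i) & 1)
--         if s == half:
--             return [(bits >> i) & 1 for i in range(n)]
--     return None
-- ===== SOURCE B (Python) =====
-- def find_partition_solution(sizes):
--     """Return a config (0/1 list) for a balanced partition, or None."""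
--     total = sum(sizes)
--     if total % 2 != 0:
--         return None
--     half = total // 2
--     memo = {}
--
--     def go(k, target):
--         # minimal-bits 0/1 assignment for indices 0..k-1 summing to target
--         if k == 0:
--             return [] if target == 0 else None
--         key = (k, target)
--         if key in memo:
--             return memo[key]
--         r = go(k - 1, target)
--         if r is not None:
--             r = r + [0]
--         else:
--             r = go(k - 1, target - sizes[k - 1])
--             if r is not None:
--                 r = r + [1]
--         memo[key] = r
--         return r
--
--     return go(len(sizes), half)
-- ===== Notes on version B (the rewrite author's own statement) =====
-- stated objective: alternative
-- what changed: A enumerates all 2^n bitmasks and sums each; B runs a memoized top-down subset-sum recursion (dynamic programming over (prefix length, remaining target)) that reconstructs the same smallest-bitmask solution, preferring bit 0 at each index from the highest index down.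
import Mathlib
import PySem

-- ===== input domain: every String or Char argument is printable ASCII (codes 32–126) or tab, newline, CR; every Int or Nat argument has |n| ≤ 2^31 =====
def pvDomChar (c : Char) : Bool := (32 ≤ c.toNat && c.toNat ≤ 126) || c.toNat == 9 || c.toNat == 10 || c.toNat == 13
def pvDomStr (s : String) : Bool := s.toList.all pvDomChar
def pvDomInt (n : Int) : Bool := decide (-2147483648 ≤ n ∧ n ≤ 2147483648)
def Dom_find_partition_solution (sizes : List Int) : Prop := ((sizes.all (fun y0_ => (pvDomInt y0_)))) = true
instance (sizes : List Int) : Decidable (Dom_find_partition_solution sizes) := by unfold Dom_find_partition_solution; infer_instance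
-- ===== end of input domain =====

-- B replaces A's enumeration of all bitmasks by a memoized top-down subset-sum recursion
-- (dynamic programming) that reconstructs the same smallest-bitmask answer.

-- ===== PORT A =====
-- the 'for bits in range(2**n)' loop with its early return; '(bits >> i) & 1' is
-- PySem.Int.band (bits >>> i) 1 (exact: Python's >> on int is Lean's >>>); 'sizes[i]' for
-- i ∈ range(n) is sizes.getD i 0 (exact: 0 ≤ i < len(sizes) always holds here)
def pvALoop (sizes : List Int) (n : Nat) (half : Int) : List Int → Option (List Int)
  | [] => none
  | bits :: rest =>
      let s := (((List.range n).filter (fun (i : Nat) => PySem.Int.band (bits >>> i) 1 == 1)).map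
                  (fun i => sizes.getD i 0)).sum
      if s = half then
        some ((List.range n).map (fun (i : Nat) => PySem.Int.band (bits >>> i) 1))
      else pvALoop sizes n half rest

def find_partition_solution (sizes : List Int) : Option (List Int) :=
  let total := sizes.sum
  if PySem.Int.mod total 2 ≠ 0 then none
  else
    let half := PySem.Int.floordiv total 2
    let n := sizes.length
    pvALoop sizes n half (PySem.List.pyRange 0 ((2 : Int) ^ n) 1)

-- ===== PORT B =====
-- memoized recursion go(k, target) from Source B; the memo dict is threaded explicitly;
-- 'sizes[k-1]' (0 ≤ k-1 < len(sizes) at every call site) is sizes.getD k 0 with k the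
-- predecessor; the Python int k is represented by the Nat it always is here
def pvGoMemo (sizes : List Int) :
    Nat → Int → PySem.Dict (Nat × Int) (Option (List Int)) →
    Option (List Int) × PySem.Dict (Nat × Int) (Option (List Int))
  | 0, target, memo => (if target = 0 then some [] else none, memo)
  | k + 1, target, memo =>
      match memo.get? (k + 1, target) with
      | some v => (v, memo)
      | none =>
          match pvGoMemo sizes k target memo with
          | (some r, memo) => (some (r ++ [0]), memo.insert (k + 1, target) (some (r ++ [0])))
          | (none, memo) =>
              match pvGoMemo sizes k (target - sizes.getD k 0) memo with
              | (some r, memo) => (some (r ++ [1]), memo.insert (k + 1, target) (some (r ++ [1])))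
              | (none, memo) => (none, memo.insert (k + 1, target) none)

def find_partition_solution_alt (sizes : List Int) : Option (List Int) :=
  let total := sizes.sum
  if PySem.Int.mod total 2 ≠ 0 then none
  else
    let half := PySem.Int.floordiv total 2
    (pvGoMemo sizes sizes.length half PySem.Dict.empty).1

-- ===== PRECONDITION & SPEC =====
def Spec_find_partition_solution (sizes : List Int) (out : Option (List Int)) : Prop := out = find_partition_solution_alt sizes
instance (sizes : List Int) (out : Option (List Int)) : Decidable (Spec_find_partition_solution sizes out) := by unfold Spec_find_partition_solution; infer_instance

-- ===== CLAIM (what is proved, stated in full; the proofs are below) =====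
def Claim_equal_find_partition_solution : Prop := ∀ (sizes : List Int), Dom_find_partition_solution sizes → Spec_find_partition_solution sizes (find_partition_solution sizes)

-- ===== LEMMAS AND PROOFS =====

-- goP is the memo-free meaning of pvGoMemo; an accurate-memo invariant connects them

def goP (sizes : List Int) : Nat → Int → Option (List Int)
  | 0, t => if t = 0 then some [] else none
  | k + 1, t =>
      match goP sizes k t with
      | some r => some (r ++ [0])
      | none =>
          match goP sizes k (t - sizes.getD k 0) with
          | some r => some (r ++ [1])
          | none => none

def MemoInv (sizes : List Int) (memo : PySem.Dict (Nat × Int) (Option (List Int))) : Prop :=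
  ∀ k t v, memo.get? (k, t) = some v → v = goP sizes k t

lemma memoInv_insert (sizes : List Int) (memo : PySem.Dict (Nat × Int) (Option (List Int)))
    (h : MemoInv sizes memo) (k : Nat) (t : Int) :
    MemoInv sizes (memo.insert (k, t) (goP sizes k t)) := by
  intro k' t' v hv
  rcases eq_or_ne ((k' : Nat), t') ((k : Nat), t) with heq | hne
  · rw [heq, PySem.Dict.get?_insert_self] at hv
    obtain ⟨h1, h2⟩ := Prod.mk.injEq .. ▸ heq
    subst h1; subst h2
    exact (Option.some.injEq .. ▸ hv).symm
  · rw [PySem.Dict.get?_insert_of_ne _ _ hne] at hv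
    exact h _ _ _ hv

lemma pvGoMemo_correct (sizes : List Int) :
    ∀ (k : Nat) (t : Int) (memo : PySem.Dict (Nat × Int) (Option (List Int))),
      MemoInv sizes memo →
      (pvGoMemo sizes k t memo).1 = goP sizes k t ∧ MemoInv sizes (pvGoMemo sizes k t memo).2 := by
  intro k
  induction k with
  | zero =>
      intro t memo h
      exact ⟨by simp [pvGoMemo, goP], h⟩
  | succ k ih =>
      intro t memo h
      cases hm : memo.get? (k + 1, t) with
      | some v =>
          have hstep : pvGoMemo sizes (k+1) t memo = (v, memo) := by
            rw [pvGoMemo, hm]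
          rw [hstep]
          exact ⟨(h _ _ _ hm), h⟩
      | none =>
          obtain ⟨ih1, ih2⟩ := ih t memo h
          cases hrec : pvGoMemo sizes k t memo with
          | mk r0 memo0 =>
              rw [hrec] at ih1 ih2
              cases r0 with
              | some r =>
                  have hgo : goP sizes (k+1) t = some (r ++ [0]) := by
                    rw [goP, ← ih1]
                  have hstep : pvGoMemo sizes (k+1) t memo =
                      (some (r ++ [0]), memo0.insert (k+1, t) (some (r ++ [0]))) := by
                    simp only [pvGoMemo, hm, hrec]
                  rw [hstep]
                  refine ⟨hgo.symm, ?_⟩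
                  have := memoInv_insert sizes memo0 ih2 (k+1) t
                  rwa [hgo] at this
              | none =>
                  obtain ⟨jh1, jh2⟩ := ih (t - sizes.getD k 0) memo0 ih2
                  cases hrec2 : pvGoMemo sizes k (t - sizes.getD k 0) memo0 with
                  | mk r1 memo1 =>
                      rw [hrec2] at jh1 jh2
                      cases r1 with
                      | some r =>
                          have hgo : goP sizes (k+1) t = some (r ++ [1]) := by
                            rw [goP, ← ih1, ← jh1]
                          have hstep : pvGoMemo sizes (k+1) t memo =
                              (some (r ++ [1]), memo1.insert (k+1, t) (some (r ++ [1]))) := by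
                            simp only [pvGoMemo, hm, hrec, hrec2]
                          rw [hstep]
                          refine ⟨hgo.symm, ?_⟩
                          have := memoInv_insert sizes memo1 jh2 (k+1) t
                          rwa [hgo] at this
                      | none =>
                          have hgo : goP sizes (k+1) t = none := by
                            rw [goP, ← ih1, ← jh1]
                          have hstep : pvGoMemo sizes (k+1) t memo =
                              (none, memo1.insert (k+1, t) none) := by
                            simp only [pvGoMemo, hm, hrec, hrec2]
                          rw [hstep]
                          refine ⟨hgo.symm, ?_⟩
                          have := memoInv_insert sizes memo1 jh2 (k+1) t
                          rwa [hgo] at this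

lemma band_shift_eq_testBit (b i : Nat) :
    PySem.Int.band ((b : Int) >>> i) 1 = if b.testBit i then 1 else 0 := by
  have h1 : (b:Int) >>> i = ((b >>> i : Nat) : Int) := by simp
  rw [h1, show ((1:Int) = ((1:Nat):Int)) from rfl, PySem.Int.band_natCast]
  rw [Nat.and_one_is_mod, ← Nat.decide_shiftRight_mod_two_eq_one]
  rcases Nat.mod_two_eq_zero_or_one (b >>> i) with h | h
  · rw [h]; simp
  · rw [h]; simp

lemma band_beq (b i : Nat) : (PySem.Int.band ((b : Int) >>> i) 1 == 1) = b.testBit i := by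
  rw [band_shift_eq_testBit]
  cases b.testBit i
  · simp
  · simp

def sFun (sizes : List Int) (n : Nat) (bits : Int) : Int :=
  (((List.range n).filter (fun (i : Nat) => PySem.Int.band (bits >>> i) 1 == 1)).map
      (fun i => sizes.getD i 0)).sum

def blFun (n : Nat) (bits : Int) : List Int :=
  (List.range n).map (fun (i : Nat) => PySem.Int.band (bits >>> i) 1)

lemma sFun_nat (sizes : List Int) (n : Nat) (b : Nat) :
    sFun sizes n (b : Int) =
      (((List.range n).filter (fun i => b.testBit i)).map (fun i => sizes.getD i 0)).sum := by
  unfold sFun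
  congr 2
  exact List.filter_congr (fun i _ => band_beq b i)

lemma blFun_nat (n : Nat) (b : Nat) :
    blFun n (b : Int) = (List.range n).map (fun i => if b.testBit i then (1:Int) else 0) := by
  unfold blFun
  exact List.map_congr_left (fun i _ => band_shift_eq_testBit b i)

lemma F1s (sizes : List Int) (k : Nat) (b : Nat) (h : b < 2^k) :
    sFun sizes (k+1) (b : Int) = sFun sizes k (b : Int) := by
  rw [sFun_nat, sFun_nat, List.range_succ, List.filter_append]
  simp [Nat.testBit_lt_two_pow h]

lemma F1b (k : Nat) (b : Nat) (h : b < 2^k) :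
    blFun (k+1) (b : Int) = blFun k (b : Int) ++ [0] := by
  rw [blFun_nat, blFun_nat, List.range_succ, List.map_append]
  simp [Nat.testBit_lt_two_pow h]

lemma top_bit (k b : Nat) (h : b < 2^k) : (2^k + b).testBit k = true := by
  rw [Nat.testBit_two_pow_add_eq]
  simp [Nat.testBit_lt_two_pow h]

lemma F2s (sizes : List Int) (k : Nat) (b : Nat) (h : b < 2^k) :
    sFun sizes (k+1) ((2^k + b : Nat) : Int) = sFun sizes k (b : Int) + sizes.getD k 0 := by
  rw [sFun_nat, sFun_nat, List.range_succ, List.filter_append]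
  rw [List.filter_congr (fun i hi => by
    rw [Nat.testBit_two_pow_add_gt (List.mem_range.mp hi) b])]
  simp [top_bit k b h]

lemma F2b (k : Nat) (b : Nat) (h : b < 2^k) :
    blFun (k+1) ((2^k + b : Nat) : Int) = blFun k (b : Int) ++ [1] := by
  rw [blFun_nat, blFun_nat, List.range_succ, List.map_append]
  rw [List.map_congr_left (fun i hi => by
    rw [Nat.testBit_two_pow_add_gt (List.mem_range.mp hi) b])]
  simp [top_bit k b h]

lemma find?_congr_mem {α} (p q : α → Bool) (l : List α) (h : ∀ a ∈ l, p a = q a) :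
    l.find? p = l.find? q := by
  induction l with
  | nil => rfl
  | cons a l ih =>
      simp [List.find?, h a List.mem_cons_self, ih fun x hx => h x (List.mem_cons_of_mem _ hx)]

lemma pyRange_pow (k : Nat) :
    PySem.List.pyRange 0 ((2:Int)^k) 1 = (List.range (2^k)).map Nat.cast := by
  rw [show ((2:Int)^k) = ((2^k : Nat) : Int) by push_cast; ring, PySem.List.pyRange_zero_natCast]

lemma pvALoop_eq_find (sizes : List Int) (n : Nat) (half : Int) (l : List Int) :
    pvALoop sizes n half l =
      (l.find? (fun bits => sFun sizes n bits == half)).map (blFun n) := by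
  induction l with
  | nil => rfl
  | cons b rest ih =>
      simp only [pvALoop, List.find?]
      by_cases hs : sFun sizes n b = half
      · have hb : (sFun sizes n b == half) = true := by simp [hs]
        have hs' := hs; simp only [sFun] at hs'
        rw [hb, if_pos hs']
        rfl
      · have hb : (sFun sizes n b == half) = false := by simp [hs]
        have hs' := hs; simp only [sFun] at hs'
        rw [hb, if_neg hs']
        exact ih

lemma key_lemma (sizes : List Int) :
    ∀ (k : Nat) (t : Int),
      pvALoop sizes k t (PySem.List.pyRange 0 ((2 : Int) ^ k) 1) = goP sizes k t := by
  intro k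
  induction k with
  | zero =>
      intro t
      rw [show PySem.List.pyRange 0 ((2:Int)^0) 1 = [0] by rw [pyRange_pow]; rfl]
      simp only [pvALoop, goP, List.range_zero, List.filter_nil, List.map_nil, List.sum_nil]
      by_cases h : t = 0 <;> simp [h, eq_comm]
  | succ k ih =>
      intro t
      have ihf : ∀ t', Option.map (blFun k)
          (Option.map Nat.cast ((List.range (2^k)).find? (fun b => sFun sizes k (b:Int) == t'))) =
          goP sizes k t' := by
        intro t'
        have := ih t'
        rw [pvALoop_eq_find, pyRange_pow, List.find?_map] at this
        exact this
      rw [pvALoop_eq_find, pyRange_pow,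
        show 2^(k+1) = 2^k + 2^k by ring, List.range_add, List.map_append,
        List.find?_append, List.find?_map, List.map_map, List.find?_map]
      rw [find?_congr_mem ((fun bits => sFun sizes (k+1) bits == t) ∘ Nat.cast)
            (fun b => sFun sizes k (b:Int) == t) _
            (fun b hb => by
              show (sFun sizes (k+1) (b:Int) == t) = _
              rw [F1s sizes k b (List.mem_range.mp hb)])]
      rw [find?_congr_mem ((fun bits => sFun sizes (k+1) bits == t) ∘ (Nat.cast ∘ (2^k + ·)))
            (fun b => sFun sizes k (b:Int) == t - sizes.getD k 0) _
            (fun b hb => by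
              show (sFun sizes (k+1) ((2^k + b : Nat):Int) == t) = _
              rw [F2s sizes k b (List.mem_range.mp hb)]
              apply Bool.eq_iff_iff.mpr
              simp only [beq_iff_eq]
              omega)]
      cases h1 : (List.range (2^k)).find? (fun (b : Nat) => sFun sizes k (b:Int) == t) with
      | some b =>
          have hb : b < 2^k := List.mem_range.mp (List.mem_of_find?_eq_some h1)
          have hb : b < 2^k := List.mem_range.mp (List.mem_of_find?_eq_some h1)
          have hg : goP sizes k t = some (blFun k (b:Int)) := by
            rw [← ihf t, h1]; rfl
          simp [goP, hg, F1b k b hb]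
      | none =>
          have hg0 : goP sizes k t = none := by rw [← ihf t, h1]; rfl
          cases h2 : (List.range (2^k)).find?
              (fun (b : Nat) => sFun sizes k (b:Int) == t - sizes.getD k 0) with
          | some b =>
              have hb : b < 2^k := List.mem_range.mp (List.mem_of_find?_eq_some h2)
              have hg2 : goP sizes k (t - sizes.getD k 0) = some (blFun k (b:Int)) := by
                rw [← ihf _, h2]; rfl
              simp only [Option.map_none, Option.none_or, Option.map_some,
                Function.comp_apply, goP]
              rw [hg0, hg2, F2b k b hb]
          | none =>
              have hg2 : goP sizes k (t - sizes.getD k 0) = none := by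
                rw [← ihf _, h2]; rfl
              simp only [Option.map_none, Option.none_or, goP]
              rw [hg0, hg2]

-- ===== VERDICT (by name: the statement is the Claim_ definition above) =====
theorem find_partition_solution_spec : Claim_equal_find_partition_solution := by
  intro sizes _
  show find_partition_solution sizes = find_partition_solution_alt sizes
  show (if PySem.Int.mod sizes.sum 2 ≠ 0 then none
        else pvALoop sizes sizes.length (PySem.Int.floordiv sizes.sum 2)
               (PySem.List.pyRange 0 ((2 : Int) ^ sizes.length) 1)) =
       (if PySem.Int.mod sizes.sum 2 ≠ 0 then none
        else (pvGoMemo sizes sizes.length (PySem.Int.floordiv sizes.sum 2) PySem.Dict.empty).1)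
  split
  · rfl
  · exact (key_lemma sizes _ _).trans
      ((pvGoMemo_correct sizes sizes.length _ PySem.Dict.empty
        (fun k t v h => by simp [PySem.Dict.get?_empty] at h)).1).symm
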